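-- pv_equiv track=rewrite | github.com/WillBarton888/dilithion | demo_wallet_interface.py | validate_passphrase_strength
-- ===== SOURCE A (Python) =====
-- def validate_passphrase_strength(passphrase):
--     """Simple passphrase strength validation"""
--     if not passphrase:
--         return 0, "No passphrase"
--
--     score = 0
--     score += min(len(passphrase) * 5, 50)  # Length (max 50 points)
--
--     if any(c.isupper() for c in passphrase):
--         score += 10
--     if any(c.islower() for c in passphrase):
--         score += 10
--     if any(c.isdigit() for c in passphrase):
--         score += 10
--     if any(c in '!@#$%^&*()_+-=[]{}|;:,.<>?' for c in passphrase):
--         score += 20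
--
--     if score >= 90:
--         return score, "Very Strong"
--     elif score >= 70:
--         return score, "Strong"
--     elif score >= 50:
--         return score, "Medium"
--     elif score >= 30:
--         return score, "Weak"
--     else:
--         return score, "Very Weak"
-- ===== SOURCE B (Python) =====
-- _SPECIALS = '!@#$%^&*()_+-=[]{}|;:,.<>?'
-- _POINTS = {"U": 10, "L": 10, "D": 10, "S": 20}
-- _LABELS = [(90, "Very Strong"), (70, "Strong"), (50, "Medium"), (30, "Weak"), (0, "Very Weak")]
--
--
-- def _classify(c):
--     """Map a character to its class id (or None if it counts for nothing)."""
--     if c.isupper():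
--         return "U"
--     if c.islower():
--         return "L"
--     if c.isdigit():
--         return "D"
--     if c in _SPECIALS:
--         return "S"
--     return None
--
--
-- def validate_passphrase_strength(passphrase):
--     """Table-driven: collect the set of character classes present, sum their
--     points from a table, and pick the label from a threshold table."""
--     if not passphrase:
--         return 0, "No passphrase"
--     present = {_classify(c) for c in passphrase}
--     score = min(len(passphrase) * 5, 50) + sum(_POINTS.get(k, 0) for k in present)
--     label = next(lbl for t, lbl in _LABELS if score >= t)
--     return score, label
-- ===== Notes on version B (the rewrite author's own statement) =====
-- stated objective: alternative
-- what changed: Table-driven rewrite: each character is classified once into a class id, the distinct classes present are collected in a set, the bonus is summed from a points table over that set, and the label is taken from a threshold table, replacing A's four any() scans and its if/elif label chain.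
import Mathlib
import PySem

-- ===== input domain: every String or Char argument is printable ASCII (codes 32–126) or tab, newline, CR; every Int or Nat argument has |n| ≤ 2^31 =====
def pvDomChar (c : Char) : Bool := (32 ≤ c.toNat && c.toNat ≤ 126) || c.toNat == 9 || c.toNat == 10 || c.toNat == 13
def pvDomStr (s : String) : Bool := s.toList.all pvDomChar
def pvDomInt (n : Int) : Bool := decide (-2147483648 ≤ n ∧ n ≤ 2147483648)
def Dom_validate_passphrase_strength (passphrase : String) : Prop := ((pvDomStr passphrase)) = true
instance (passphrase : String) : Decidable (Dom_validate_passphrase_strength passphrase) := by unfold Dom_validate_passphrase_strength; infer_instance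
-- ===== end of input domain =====

-- B is table-driven: each character is classified once into a class id, the set of
-- classes present is collected, points are summed from a table and the label is taken
-- from a threshold table — replacing A's four any() scans and if/elif label chain.

-- ===== PORT A =====
def pvSpecials : List Char :=
  ['!','@','#','$','%','^','&','*','(',')','_','+','-','=','[',']','{','}','|',';',':',',','.','<','>','?']

def validate_passphrase_strength (passphrase : String) : Int × String :=
  let cs := passphrase.toList
  if cs = [] then (0, "No passphrase")
  else
    let score : Int := 0
    let score := score + min ((cs.length : Int) * 5) 50
    let score := if cs.any PySem.Chars.isupper then score + 10 else score
    let score := if cs.any PySem.Chars.islower then score + 10 else score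
    let score := if cs.any PySem.Chars.isdigit then score + 10 else score
    let score := if cs.any (fun c => pvSpecials.contains c) then score + 20 else score
    if score ≥ 90 then (score, "Very Strong")
    else if score ≥ 70 then (score, "Strong")
    else if score ≥ 50 then (score, "Medium")
    else if score ≥ 30 then (score, "Weak")
    else (score, "Very Weak")

-- ===== PORT B =====
-- _POINTS: Python's str-keyed dict; B also looks it up at None (→ default 0),
-- so the port keys the association list by Option String.
def pvPoints : PySem.Dict (Option String) Int :=
  PySem.Dict.ofList [(some "U", 10), (some "L", 10), (some "D", 10), (some "S", 20)]

def pvLabels : List (Int × String) :=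
  [(90, "Very Strong"), (70, "Strong"), (50, "Medium"), (30, "Weak"), (0, "Very Weak")]

def pvClassify (c : Char) : Option String :=
  if PySem.Chars.isupper c then some "U"
  else if PySem.Chars.islower c then some "L"
  else if PySem.Chars.isdigit c then some "D"
  else if pvSpecials.contains c then some "S"
  else none

-- next(lbl for t, lbl in _LABELS if score >= t); the [] case is next()'s StopIteration,
-- unreachable here because the table ends with threshold 0 and score ≥ 0.
def pvFirstLabel (score : Int) : List (Int × String) → String
  | [] => ""
  | (t, l) :: rest => if score ≥ t then l else pvFirstLabel score rest

def validate_passphrase_strength_alt (passphrase : String) : Int × String :=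
  let cs := passphrase.toList
  if cs = [] then (0, "No passphrase")
  else
    let present : PySem.Set (Option String) := PySem.Set.ofList (cs.map pvClassify)
    let score : Int := min ((cs.length : Int) * 5) 50
      + (present.map (fun k => pvPoints.getD k 0)).sum
    (score, pvFirstLabel score pvLabels)

-- ===== PRECONDITION & SPEC =====
def Spec_validate_passphrase_strength (passphrase : String) (out : Int × String) : Prop := out = validate_passphrase_strength_alt passphrase
instance (passphrase : String) (out : Int × String) : Decidable (Spec_validate_passphrase_strength passphrase out) := by unfold Spec_validate_passphrase_strength; infer_instance

-- ===== CLAIM (what is proved, stated in full; the proofs are below) =====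
def Claim_equal_validate_passphrase_strength : Prop := ∀ (passphrase : String), Dom_validate_passphrase_strength passphrase → Spec_validate_passphrase_strength passphrase (validate_passphrase_strength passphrase)

-- ===== LEMMAS AND PROOFS =====

theorem pv_upper_not_lower (c : Char) (h : PySem.Chars.isupper c = true) :
    PySem.Chars.islower c = false := by
  have hA : ('A':Char).val.toNat = 65 := rfl
  have hZ : ('Z':Char).val.toNat = 90 := rfl
  have ha : ('a':Char).val.toNat = 97 := rfl
  have hz : ('z':Char).val.toNat = 122 := rfl
  simp [PySem.Chars.isupper, PySem.Chars.islower, Char.le_def, UInt32.le_iff_toNat_le] at *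
  omega

theorem pv_digit_not_letter (c : Char) (h : PySem.Chars.isdigit c = true) :
    PySem.Chars.isupper c = false ∧ PySem.Chars.islower c = false := by
  have hA : ('A':Char).val.toNat = 65 := rfl
  have hZ : ('Z':Char).val.toNat = 90 := rfl
  have ha : ('a':Char).val.toNat = 97 := rfl
  have hz : ('z':Char).val.toNat = 122 := rfl
  have h0 : ('0':Char).val.toNat = 48 := rfl
  have h9 : ('9':Char).val.toNat = 57 := rfl
  simp [PySem.Chars.isupper, PySem.Chars.islower, PySem.Chars.isdigit, Char.le_def,
    UInt32.le_iff_toNat_le] at *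
  omega

theorem pv_special_not_alnum (c : Char) (h : c ∈ pvSpecials) :
    PySem.Chars.isupper c = false ∧ PySem.Chars.islower c = false ∧
      PySem.Chars.isdigit c = false := by
  fin_cases h <;> decide

theorem pv_classify_U (c : Char) :
    (pvClassify c = some "U") ↔ PySem.Chars.isupper c = true := by
  unfold pvClassify; split_ifs <;> simp_all

theorem pv_classify_L (c : Char) :
    (pvClassify c = some "L") ↔ PySem.Chars.islower c = true := by
  by_cases h1 : PySem.Chars.isupper c = true
  · simp [pvClassify, h1, pv_upper_not_lower c h1]
  · by_cases h2 : PySem.Chars.islower c = true <;>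
      simp [pvClassify, h1, h2] <;> split_ifs <;> simp_all

theorem pv_classify_D (c : Char) :
    (pvClassify c = some "D") ↔ PySem.Chars.isdigit c = true := by
  by_cases hd : PySem.Chars.isdigit c = true
  · simp [pvClassify, hd, (pv_digit_not_letter c hd).1, (pv_digit_not_letter c hd).2]
  · simp [pvClassify]; split_ifs <;> simp_all

theorem pv_classify_S (c : Char) :
    (pvClassify c = some "S") ↔ pvSpecials.contains c = true := by
  by_cases hs : pvSpecials.contains c = true
  · have hm : c ∈ pvSpecials := by simpa using hs
    obtain ⟨e1, e2, e3⟩ := pv_special_not_alnum c hm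
    simp [pvClassify, e1, e2, e3, hs]
  · simp [pvClassify, hs]; split_ifs <;> simp_all

theorem pv_points_other (k : Option String) (h1 : k ≠ some "U") (h2 : k ≠ some "L")
    (h3 : k ≠ some "D") (h4 : k ≠ some "S") : pvPoints.getD k 0 = 0 := by
  have hmk : pvPoints
      = PySem.Dict.mk [(some "U", 10), (some "L", 10), (some "D", 10), (some "S", 20)] := by
    decide
  rw [hmk, PySem.Dict.getD_eq_get?_getD]
  simp [PySem.Dict.get?_mk_cons, Ne.symm h1, Ne.symm h2, Ne.symm h3, Ne.symm h4,
    PySem.Dict.get?]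

theorem pv_sum_points (s : List (Option String)) (hn : s.Nodup) :
    (s.map (fun k => pvPoints.getD k 0)).sum
      = (if some "U" ∈ s then (10:Int) else 0) + (if some "L" ∈ s then 10 else 0)
        + (if some "D" ∈ s then 10 else 0) + (if some "S" ∈ s then 20 else 0) := by
  have eU : pvPoints.getD (some "U") 0 = 10 := by decide
  have eL : pvPoints.getD (some "L") 0 = 10 := by decide
  have eD : pvPoints.getD (some "D") 0 = 10 := by decide
  have eS : pvPoints.getD (some "S") 0 = 20 := by decide
  induction s with
  | nil => simp
  | cons a t ih =>
    obtain ⟨ha, ht⟩ := List.nodup_cons.mp hn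
    rw [List.map_cons, List.sum_cons, ih ht]
    by_cases h1 : a = some "U"
    · subst h1; simp [ha, eU]; omega
    · by_cases h2 : a = some "L"
      · subst h2; simp [ha, eL]; omega
      · by_cases h3 : a = some "D"
        · subst h3; simp [ha, eD]; omega
        · by_cases h4 : a = some "S"
          · subst h4; simp [ha, eS]; omega
          · rw [pv_points_other a h1 h2 h3 h4]
            simp [List.mem_cons, Ne.symm h1, Ne.symm h2, Ne.symm h3, Ne.symm h4]

theorem pv_mem_map_U (cs : List Char) :
    (some "U" ∈ cs.map pvClassify) ↔ cs.any PySem.Chars.isupper = true := by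
  simp only [List.mem_map, List.any_eq_true]
  constructor
  · rintro ⟨c, hc, e⟩; exact ⟨c, hc, (pv_classify_U c).mp e⟩
  · rintro ⟨c, hc, e⟩; exact ⟨c, hc, (pv_classify_U c).mpr e⟩

theorem pv_mem_map_L (cs : List Char) :
    (some "L" ∈ cs.map pvClassify) ↔ cs.any PySem.Chars.islower = true := by
  simp only [List.mem_map, List.any_eq_true]
  constructor
  · rintro ⟨c, hc, e⟩; exact ⟨c, hc, (pv_classify_L c).mp e⟩
  · rintro ⟨c, hc, e⟩; exact ⟨c, hc, (pv_classify_L c).mpr e⟩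

theorem pv_mem_map_D (cs : List Char) :
    (some "D" ∈ cs.map pvClassify) ↔ cs.any PySem.Chars.isdigit = true := by
  simp only [List.mem_map, List.any_eq_true]
  constructor
  · rintro ⟨c, hc, e⟩; exact ⟨c, hc, (pv_classify_D c).mp e⟩
  · rintro ⟨c, hc, e⟩; exact ⟨c, hc, (pv_classify_D c).mpr e⟩

theorem pv_mem_map_S (cs : List Char) :
    (some "S" ∈ cs.map pvClassify) ↔ cs.any (fun c => pvSpecials.contains c) = true := by
  simp only [List.mem_map, List.any_eq_true]
  constructor
  · rintro ⟨c, hc, e⟩; exact ⟨c, hc, (pv_classify_S c).mp e⟩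
  · rintro ⟨c, hc, e⟩; exact ⟨c, hc, (pv_classify_S c).mpr e⟩

theorem pv_label_chain (s t : Int) (hst : s = t) (h0 : 0 ≤ t) :
    (if s ≥ 90 then (s, "Very Strong")
     else if s ≥ 70 then (s, "Strong")
     else if s ≥ 50 then (s, "Medium")
     else if s ≥ 30 then (s, "Weak")
     else (s, "Very Weak"))
    = (t, pvFirstLabel t pvLabels) := by
  subst hst
  simp only [pvFirstLabel, pvLabels]
  split_ifs <;> first | rfl | omega

-- ===== VERDICT (by name: the statement is the Claim_ definition above) =====
theorem validate_passphrase_strength_spec : Claim_equal_validate_passphrase_strength := by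
  intro p _
  unfold Spec_validate_passphrase_strength validate_passphrase_strength validate_passphrase_strength_alt
  by_cases h : p.toList = []
  · simp [h]
  · simp only [h, if_false]
    rw [pv_sum_points (PySem.Set.ofList (p.toList.map pvClassify))
      (PySem.Set.nodup_ofList _)]
    simp only [PySem.Set.mem_ofList, pv_mem_map_U, pv_mem_map_L, pv_mem_map_D, pv_mem_map_S]
    have hlen : 1 ≤ (p.toList.length : Int) := by
      have := List.length_pos_iff.mpr h; omega
    cases hu : p.toList.any PySem.Chars.isupper <;>
      cases hl : p.toList.any PySem.Chars.islower <;>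
        cases hd : p.toList.any PySem.Chars.isdigit <;>
          cases hs : p.toList.any (fun c => pvSpecials.contains c) <;>
            · simp only [Bool.false_eq_true, if_true, if_false, zero_add, add_zero]
              exact pv_label_chain _ _ (by omega) (by omega)
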